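-- pv_equiv track=rewrite | github.com/HadiaSajjad123/Python-Encryption-decryption_tool | ciphers.py | combined_transposition_encrypt
-- ===== SOURCE A (Python) =====
-- def combined_transposition_encrypt(plaintext, key):
--     try:
--         # Keyless Transposition Encrypt
--         intermediate = plaintext[::-1]  # Example: Reverse the plaintext
--
--         # Keyed Transposition Encrypt
--         n = len(key)
--         matrix = ['' for _ in range(n)]
--
--         for i, char in enumerate(intermediate):
--             matrix[i % n] += char
--
--         # Sorting the matrix based on the alphabetical order of the key
--         sorted_indices = sorted(range(len(key)), key=lambda x: key[x])
--         sorted_matrix = ['' for _ in range(n)]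
--
--         for i, index in enumerate(sorted_indices):
--             sorted_matrix[i] = matrix[index]
--
--         return ''.join(sorted_matrix)
--
--     except Exception as e:
--         return f"Error: {e}"
-- ===== SOURCE B (Python) =====
-- def combined_transposition_encrypt(plaintext, key):
--     # Reverse, then read the round-robin columns directly with strided slices
--     # in key-sorted column order (intermediate[idx::n] IS bucket idx).
--     intermediate = plaintext[::-1]
--     n = len(key)
--     sorted_indices = sorted(range(n), key=lambda x: key[x])
--     return ''.join(intermediate[idx::n] for idx in sorted_indices)
-- ===== Notes on version B (the rewrite author's own statement) =====
-- stated objective: simpler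
-- what changed: Instead of scattering characters one by one into n bucket strings via an i % n loop and then re-assembling them with a second index-writing loop, B gathers each column directly as the strided slice intermediate[idx::n] in key-sorted order and joins them.
-- intended difference: On an empty key with nonempty plaintext A's except-clause swallows the ZeroDivisionError from i % 0 and returns the message string 'Error: integer modulo by zero' as if it were ciphertext; B returns '' (there are no columns to read), the sensible value for an unusable key. — e.g. on combined_transposition_encrypt("ab", ""): A returns "Error: integer modulo by zero", B returns ""
import Mathlib
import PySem

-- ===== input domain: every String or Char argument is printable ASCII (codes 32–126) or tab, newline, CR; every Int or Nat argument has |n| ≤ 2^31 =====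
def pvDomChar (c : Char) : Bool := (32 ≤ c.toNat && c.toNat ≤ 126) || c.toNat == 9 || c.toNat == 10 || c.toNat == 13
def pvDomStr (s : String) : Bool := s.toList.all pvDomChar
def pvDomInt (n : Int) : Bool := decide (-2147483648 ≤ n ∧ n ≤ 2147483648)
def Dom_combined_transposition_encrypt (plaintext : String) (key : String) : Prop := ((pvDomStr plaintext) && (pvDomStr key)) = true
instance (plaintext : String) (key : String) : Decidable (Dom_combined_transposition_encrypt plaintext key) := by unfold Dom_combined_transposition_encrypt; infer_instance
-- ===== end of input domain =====

-- B replaces A's scatter-into-buckets loop + index-writing reassembly loop by reading each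
-- round-robin column directly as the strided slice intermediate[idx::n] in key-sorted order.

-- ===== PORT A =====
def combined_transposition_encrypt (plaintext : String) (key : String) : String :=
  -- intermediate = plaintext[::-1]  ([::-1] is reverse: PySem.List.slice?_none_none_neg_one)
  let intermediate := plaintext.toList.reverse
  let n := key.toList.length
  -- `i % 0` in the loop raises ZeroDivisionError, caught by `except` as this message;
  -- the loop body runs (and can raise) iff intermediate is nonempty
  if intermediate ≠ [] ∧ n = 0 then "Error: integer modulo by zero"
  else
    let matrix : List (List Char) :=
      -- for i, char in enumerate(intermediate): matrix[i % n] += char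
      (PySem.List.enumerate intermediate 0).foldl
        (fun m ic =>
          m.set (PySem.Int.mod ic.1 (n : Int)).toNat
            (PySem.List.pyGetD m (PySem.Int.mod ic.1 (n : Int)) [] ++ [ic.2]))
        (List.replicate n [])
    -- sorted(range(len(key)), key=lambda x: key[x])  (x is always in range; default is unreachable)
    let sorted_indices :=
      PySem.List.sorted (PySem.List.pyRange 0 (n : Int) 1) (fun x => PySem.List.pyGetD key.toList x ' ')
    let sorted_matrix : List (List Char) :=
      -- for i, index in enumerate(sorted_indices): sorted_matrix[i] = matrix[index]
      (PySem.List.enumerate sorted_indices 0).foldl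
        (fun sm p => sm.set p.1.toNat (PySem.List.pyGetD matrix p.2 []))
        (List.replicate n [])
    String.ofList (PySem.Chars.join [] sorted_matrix)   -- ''.join(sorted_matrix)

-- ===== PORT B =====
def combined_transposition_encrypt_alt (plaintext : String) (key : String) : String :=
  let intermediate := plaintext.toList.reverse     -- plaintext[::-1]
  let n := key.toList.length
  let sorted_indices :=
    PySem.List.sorted (PySem.List.pyRange 0 (n : Int) 1) (fun x => PySem.List.pyGetD key.toList x ' ')
  -- ''.join(intermediate[idx::n] for idx in sorted_indices)
  -- (the slice is only taken for idx ∈ range(n), where n ≥ 1, so slice? is never none)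
  String.ofList (PySem.Chars.join []
    (sorted_indices.map (fun idx => (PySem.List.slice? intermediate (some idx) none (n : Int)).getD [])))

-- ===== PRECONDITION & SPEC =====
-- On an empty key with nonempty plaintext A's except-clause swallows the ZeroDivisionError from
-- i % 0 and returns the message string 'Error: integer modulo by zero' as if it were ciphertext;
-- B returns '' (there are no columns to read), the sensible value for an unusable key.
def D_combined_transposition_encrypt (plaintext : String) (key : String) : Prop :=
  key = "" ∧ plaintext ≠ ""
instance (plaintext : String) (key : String) : Decidable (D_combined_transposition_encrypt plaintext key) := by
  unfold D_combined_transposition_encrypt; infer_instance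

def Spec_combined_transposition_encrypt (plaintext : String) (key : String) (out : String) : Prop :=
  ¬ D_combined_transposition_encrypt plaintext key → out = combined_transposition_encrypt_alt plaintext key
instance (plaintext : String) (key : String) (out : String) : Decidable (Spec_combined_transposition_encrypt plaintext key out) := by
  unfold Spec_combined_transposition_encrypt; infer_instance

def pvDiffWitness_combined_transposition_encrypt : String × String := ("ab", "")
def pvDiffWitnessOut_combined_transposition_encrypt : String × String :=
  ("Error: integer modulo by zero", "")

-- ===== CLAIM (what is proved, stated in full; the proofs are below) =====
def Claim_unchanged_combined_transposition_encrypt : Prop := ∀ (plaintext : String) (key : String), Dom_combined_transposition_encrypt plaintext key → Spec_combined_transposition_encrypt plaintext key (combined_transposition_encrypt plaintext key)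
def Claim_changed_combined_transposition_encrypt : Prop := Dom_combined_transposition_encrypt (pvDiffWitness_combined_transposition_encrypt.1) (pvDiffWitness_combined_transposition_encrypt.2) ∧ D_combined_transposition_encrypt (pvDiffWitness_combined_transposition_encrypt.1) (pvDiffWitness_combined_transposition_encrypt.2) ∧ combined_transposition_encrypt (pvDiffWitness_combined_transposition_encrypt.1) (pvDiffWitness_combined_transposition_encrypt.2) = pvDiffWitnessOut_combined_transposition_encrypt.1 ∧ combined_transposition_encrypt_alt (pvDiffWitness_combined_transposition_encrypt.1) (pvDiffWitness_combined_transposition_encrypt.2) = pvDiffWitnessOut_combined_transposition_encrypt.2 ∧ pvDiffWitnessOut_combined_transposition_encrypt.1 ≠ pvDiffWitnessOut_combined_transposition_encrypt.2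
def Claim_exact_combined_transposition_encrypt : Prop := ∀ (plaintext : String) (key : String), Dom_combined_transposition_encrypt plaintext key → D_combined_transposition_encrypt plaintext key → combined_transposition_encrypt plaintext key ≠ combined_transposition_encrypt_alt plaintext key

-- ===== LEMMAS AND PROOFS =====

-- bucket j of A's round-robin scatter, tracked by the running residue r = i % n
def pvBucketR (n j : Nat) : Nat → List Char → List Char
  | _, [] => []
  | r, c :: cs => (if r = j then [c] else []) ++ pvBucketR n j ((r + 1) % n) cs

-- every n-th element, starting at the head (= the strided slice xs[0::n])
def pvEveryN {α : Type} (n : Nat) : List α → List α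
  | [] => []
  | c :: cs => c :: pvEveryN n (cs.drop (n - 1))
termination_by xs => xs.length
decreasing_by simp

theorem pv_set_map_range {α : Type} (n i : Nat) (f : Nat → α) (v : α) :
    ((List.range n).map f).set i v = (List.range n).map (fun j => if j = i then v else f j) := by
  apply List.ext_getElem
  · simp
  · intro k h1 h2
    have hk : k < n := by simpa using h1
    simp only [List.getElem_set, List.getElem_map, List.getElem_range]
    by_cases h : i = k
    · simp [h]
    · have h' : ¬ k = i := fun hh => h hh.symm
      simp [h, h']

theorem pv_foldA (n : Nat) (hn : 0 < n) (xs : List Char) : ∀ (s : Nat) (f : Nat → List Char),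
    List.foldl
      (fun m (ic : Int × Char) =>
        m.set (PySem.Int.mod ic.1 (n : Int)).toNat
          (PySem.List.pyGetD m (PySem.Int.mod ic.1 (n : Int)) [] ++ [ic.2]))
      ((List.range n).map f) (PySem.List.enumerate xs (s : Int))
    = (List.range n).map (fun j => f j ++ pvBucketR n j (s % n) xs) := by
  induction xs with
  | nil =>
    intro s f
    rw [show PySem.List.enumerate ([] : List Char) (s : Int) = [] from rfl]
    simp only [List.foldl_nil]
    apply List.map_congr_left
    intro j _
    rw [show pvBucketR n j (s % n) [] = [] from rfl, List.append_nil]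
  | cons c cs ih =>
    intro s f
    rw [PySem.List.enumerate_cons, List.foldl_cons]
    have hmod : PySem.Int.mod (s : Int) (n : Int) = ((s % n : Nat) : Int) := by
      have h0 : (0:Int) ≤ (n:Int) := by positivity
      simp [PySem.Int.mod, Int.fmod_eq_emod, h0]
    have hlt : s % n < n := Nat.mod_lt _ hn
    rw [hmod]
    simp only [Int.toNat_natCast, PySem.List.pyGetD_natCast]
    rw [List.getD_eq_getElem _ _ (by simpa using hlt)]
    simp only [List.getElem_map, List.getElem_range]
    rw [pv_set_map_range n (s % n)]
    have : ((s : Int) + 1) = ((s + 1 : Nat) : Int) := by push_cast; ring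
    rw [this, ih]
    apply List.map_congr_left
    intro j hj
    simp only [List.mem_range] at hj
    have hb : pvBucketR n j (s % n) (c :: cs)
        = (if s % n = j then [c] else []) ++ pvBucketR n j ((s % n + 1) % n) cs := rfl
    rw [hb, Nat.mod_add_mod]
    by_cases hje : j = s % n
    · subst hje; simp
    · have hje' : ¬ (s % n = j) := fun hh => hje hh.symm
      simp [hje, hje']

theorem pv_seqSet {α : Type} (h : Int → α) : ∀ (ys : List Int) (s : Nat) (m : List α),
    m.length = s + ys.length →
    List.foldl (fun sm (p : Int × Int) => sm.set p.1.toNat (h p.2)) m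
      (PySem.List.enumerate ys (s : Int))
    = m.take s ++ ys.map h := by
  intro ys
  induction ys with
  | nil =>
    intro s m hm
    simp only [List.length_nil, Nat.add_zero] at hm
    rw [show PySem.List.enumerate ([] : List Int) (s : Int) = [] from rfl]
    simp [List.take_of_length_le (le_of_eq hm)]
  | cons y ys ih =>
    intro s m hm
    rw [PySem.List.enumerate_cons, List.foldl_cons]
    have hs : s < m.length := by simp at hm; omega
    have : ((s : Int) + 1) = ((s + 1 : Nat) : Int) := by push_cast; ring
    rw [this]
    simp only [Int.toNat_natCast]
    rw [ih (s + 1) _ (by simp at hm ⊢; omega)]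
    rw [List.set_eq_take_append_cons_drop, if_pos hs]
    have hlen : (m.take s).length = s := by simp; omega
    rw [List.take_append]
    rw [List.take_of_length_le (by omega), hlen]
    simp

theorem pv_bucketR_eq_everyN (n j : Nat) (hn : 0 < n) (hj : j < n) :
    ∀ (xs : List Char) (r : Nat), r < n →
      pvBucketR n j r xs = pvEveryN n (xs.drop (if r ≤ j then j - r else n + j - r)) := by
  intro xs
  induction xs with
  | nil => intro r _; simp [pvBucketR, pvEveryN]
  | cons c cs ih =>
    intro r hr
    have hstep : pvBucketR n j r (c :: cs)
        = (if r = j then [c] else []) ++ pvBucketR n j ((r + 1) % n) cs := rfl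
    have hR : pvEveryN n (c :: cs) = c :: pvEveryN n (cs.drop (n - 1)) := by
      simp only [pvEveryN]
    by_cases hrj : r = j
    · subst hrj
      rw [if_pos (le_refl r), Nat.sub_self, List.drop_zero, hstep, if_pos rfl, hR]
      by_cases h2 : r + 1 < n
      · rw [Nat.mod_eq_of_lt h2, ih (r + 1) h2, if_neg (by omega : ¬ r + 1 ≤ r)]
        have h3 : n + r - (r + 1) = n - 1 := by omega
        rw [h3]
        rfl
      · have hr1 : r + 1 = n := by omega
        rw [hr1, Nat.mod_self, ih 0 hn, if_pos (Nat.zero_le r), Nat.sub_zero]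
        have h3 : r = n - 1 := by omega
        rw [h3]
        rfl
    · rw [hstep, if_neg hrj, List.nil_append]
      by_cases hle : r ≤ j
      · have hrj' : r < j := lt_of_le_of_ne hle hrj
        rw [if_pos hle]
        have h2 : r + 1 < n := by omega
        rw [Nat.mod_eq_of_lt h2, ih (r + 1) h2, if_pos (by omega : r + 1 ≤ j)]
        have h3 : j - r = (j - (r + 1)) + 1 := by omega
        rw [h3, List.drop_succ_cons]
      · have hjr : j < r := by omega
        rw [if_neg hle]
        by_cases h2 : r + 1 < n
        · rw [Nat.mod_eq_of_lt h2, ih (r + 1) h2, if_neg (by omega : ¬ r + 1 ≤ j)]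
          have h3 : n + j - r = (n + j - (r + 1)) + 1 := by omega
          rw [h3, List.drop_succ_cons]
        · have hr1 : r + 1 = n := by omega
          rw [hr1, Nat.mod_self, ih 0 hn, if_pos (Nat.zero_le j), Nat.sub_zero]
          have h3 : n + j - r = j + 1 := by omega
          rw [h3, List.drop_succ_cons]

-- the count computed by slice?/sliceIndices for xs[j::n]
def pvCnt (len j n : Nat) : Nat :=
  if j < len then (((len : Int) - j + n - 1) / n).toNat else 0

theorem pv_stride_core {α : Type} (n : Nat) (hn : 0 < n) :
    ∀ (fuel : Nat) (xs : List α) (j : Nat), xs.length ≤ fuel + j →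
      (List.range (pvCnt xs.length j n)).filterMap (fun k => xs[j + n * k]?)
        = pvEveryN n (xs.drop j) := by
  intro fuel
  induction fuel with
  | zero =>
    intro xs j hf
    have hnj : ¬ j < xs.length := by omega
    rw [List.drop_eq_nil_iff.mpr (by omega)]
    simp [pvCnt, hnj, pvEveryN]
  | succ fuel ih =>
    intro xs j hf
    by_cases hj : j < xs.length
    · have hone : ((xs.length : Int) - j + n - 1) / n = ((xs.length : Int) - j - 1) / n + 1 := by
        rw [show ((xs.length : Int) - j + n - 1) = ((xs.length : Int) - j - 1) + 1 * n by ring,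
          Int.add_mul_ediv_right _ _ (by omega : (n : Int) ≠ 0)]
      have hcnt : pvCnt xs.length j n = pvCnt xs.length (j + n) n + 1 := by
        by_cases h2 : j + n < xs.length
        · have e2 : ((xs.length : Int) - ((j + n : Nat) : Int) + n - 1) = (xs.length : Int) - j - 1 := by
            push_cast; ring
          have hnn : (0:Int) ≤ ((xs.length : Int) - j - 1) / n :=
            Int.ediv_nonneg (by omega) (by omega)
          simp only [pvCnt, if_pos hj, if_pos h2, e2, hone]
          omega
        · have h0 : ((xs.length : Int) - j - 1) / n = 0 :=
            Int.ediv_eq_zero_of_lt (by omega) (by omega)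
          simp only [pvCnt, if_pos hj, if_neg h2, hone, h0]
          decide
      obtain ⟨c, rest, hcr⟩ : ∃ c rest, xs.drop j = c :: rest := by
        cases h : xs.drop j with
        | nil => exfalso; have := List.drop_eq_nil_iff.mp h; omega
        | cons c rest => exact ⟨c, rest, rfl⟩
      have hget : xs[j]? = some c := by
        have : (xs.drop j)[0]? = some c := by rw [hcr]; rfl
        simpa using this
      rw [hcnt, List.range_succ_eq_map, List.filterMap_cons, List.filterMap_map]
      simp only [Nat.mul_zero, Nat.add_zero, hget]
      have hfun : ((fun k => xs[j + n * k]?) ∘ Nat.succ) = fun k => xs[(j + n) + n * k]? := by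
        funext k
        simp only [Function.comp, Nat.succ_eq_add_one]
        congr 1
        ring
      rw [hfun, ih xs (j + n) (by omega)]
      have hrest : rest.drop (n - 1) = xs.drop (j + n) := by
        have h1 : rest = xs.drop (j + 1) := by
          have h2 : (xs.drop j).tail = rest := by rw [hcr]; rfl
          rw [← h2, List.tail_drop]
        rw [h1, List.drop_drop]
        congr 1
        omega
      rw [hcr]
      simp [pvEveryN, hrest]
    · have h0 : pvCnt xs.length j n = 0 := by simp [pvCnt, hj]
      rw [h0, List.drop_eq_nil_iff.mpr (by omega)]
      simp [pvEveryN]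

theorem pv_slice?_stride {α : Type} (n : Nat) (hn : 0 < n) (xs : List α) (j : Nat) :
    PySem.List.slice? xs (some (j : Int)) none (n : Int)
      = some (pvEveryN n (xs.drop j)) := by
  have hstep0 : ¬ ((n : Int) = 0) := by omega
  have hneg : ¬ ((n : Int) < 0) := by omega
  have hclamp1 : ¬ ((j : Int) < 0) := by omega
  have hpos : (0 : Int) < (n : Int) := by omega
  by_cases hj : j < xs.length
  · have hmin : min (j : Int) (xs.length : Int) = (j : Int) := by omega
    have hlt : (j : Int) < (xs.length : Int) := by omega
    have h1 : PySem.List.slice? xs (some (j : Int)) none (n : Int)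
        = some ((List.range (pvCnt xs.length j n)).filterMap (fun k => xs[j + n * k]?)) := by
      rw [show pvCnt xs.length j n = (((xs.length : Int) - j + n - 1) / n).toNat by
        simp [pvCnt, hj]]
      simp only [PySem.List.slice?, PySem.List.sliceIndices, hstep0, if_false, hneg,
        hclamp1, hmin, hpos, if_true, hlt]
      refine congrArg some (List.filterMap_congr ?_)
      intro k _
      have he : ((j : Int) + (n : Int) * (k : Int)).toNat = j + n * k := by
        rw [show ((j : Int) + (n : Int) * (k : Int)) = ((j + n * k : Nat) : Int) by push_cast; ring,
          Int.toNat_natCast]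
      rw [he]
    rw [h1, pv_stride_core n hn xs.length xs j (by omega)]
  · have hmin : min (j : Int) (xs.length : Int) = (xs.length : Int) := by omega
    have hlt : ¬ ((xs.length : Int) < (xs.length : Int)) := by omega
    simp only [PySem.List.slice?, PySem.List.sliceIndices, hstep0, if_false, hneg,
      hclamp1, hmin, hpos, if_true, hlt]
    rw [List.drop_eq_nil_iff.mpr (by omega : xs.length ≤ j)]
    simp [pvEveryN]

-- ===== VERDICT (by name: the statement is the Claim_ definition above) =====
theorem combined_transposition_encrypt_spec : Claim_unchanged_combined_transposition_encrypt := by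
  intro plaintext key _ hnd
  by_cases hkey : key = ""
  · have hpt : plaintext = "" := by
      by_contra hc
      exact hnd ⟨hkey, hc⟩
    subst hkey; subst hpt
    decide
  · have hln : key.toList ≠ [] := by
      intro h; exact hkey (by simpa using congrArg String.ofList h)
    have hn : 0 < key.toList.length := List.length_pos_iff.mpr hln
    simp only [combined_transposition_encrypt, combined_transposition_encrypt_alt]
    rw [if_neg (fun hc => (by omega : key.toList.length ≠ 0) hc.2)]
    have hmat :
        (PySem.List.enumerate plaintext.toList.reverse 0).foldl
          (fun m ic =>
            m.set (PySem.Int.mod ic.1 (key.toList.length : Int)).toNat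
              (PySem.List.pyGetD m (PySem.Int.mod ic.1 (key.toList.length : Int)) [] ++ [ic.2]))
          (List.replicate key.toList.length [])
        = (List.range key.toList.length).map
            (fun j => pvBucketR key.toList.length j 0 plaintext.toList.reverse) := by
      rw [show (List.replicate key.toList.length ([] : List Char))
            = (List.range key.toList.length).map (fun _ => []) by simp]
      have := pv_foldA key.toList.length hn plaintext.toList.reverse 0 (fun _ => [])
      simpa using this
    rw [hmat]
    have hlenSI : (PySem.List.sorted (PySem.List.pyRange 0 (key.toList.length : Int) 1)
        (fun x => PySem.List.pyGetD key.toList x ' ')).length = key.toList.length := by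
      rw [PySem.List.length_sorted, PySem.List.length_pyRange_one]
      omega
    have hsm := pv_seqSet
      (fun idx => PySem.List.pyGetD
        ((List.range key.toList.length).map
          (fun j => pvBucketR key.toList.length j 0 plaintext.toList.reverse)) idx [])
      (PySem.List.sorted (PySem.List.pyRange 0 (key.toList.length : Int) 1)
        (fun x => PySem.List.pyGetD key.toList x ' '))
      0 (List.replicate key.toList.length []) (by simp)
    simp only [Nat.cast_zero, List.take_zero, List.nil_append] at hsm
    rw [hsm]
    congr 1
    congr 1
    apply List.map_congr_left
    intro idx hmem
    have hidx : 0 ≤ idx ∧ idx < (key.toList.length : Int) := by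
      have := (PySem.List.mem_sorted _ _ _ _).mp hmem
      exact PySem.List.mem_pyRange_one.mp this
    obtain ⟨jn, rfl⟩ : ∃ jn : Nat, idx = (jn : Int) := ⟨idx.toNat, by omega⟩
    have hlt : jn < key.toList.length := by exact_mod_cast hidx.2
    rw [PySem.List.pyGetD_natCast]
    rw [List.getD_eq_getElem _ _ (by simpa using hlt)]
    rw [List.getElem_map, List.getElem_range]
    rw [pv_slice?_stride key.toList.length hn plaintext.toList.reverse jn, Option.getD_some]
    have hbr := pv_bucketR_eq_everyN key.toList.length jn hn hlt plaintext.toList.reverse 0 hn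
    simpa using hbr

theorem combined_transposition_encrypt_changed : Claim_changed_combined_transposition_encrypt := by
  unfold Claim_changed_combined_transposition_encrypt; decide

theorem combined_transposition_encrypt_tight : Claim_exact_combined_transposition_encrypt := by
  intro plaintext key _ hD
  obtain ⟨hk, hpt⟩ := hD
  subst hk
  have hI : plaintext.toList.reverse ≠ [] := by
    intro h
    apply hpt
    have h2 : plaintext.toList = [] := by
      rw [← List.reverse_reverse plaintext.toList, h, List.reverse_nil]
    simp_all
  have hA : combined_transposition_encrypt plaintext "" = "Error: integer modulo by zero" := by
    simp only [combined_transposition_encrypt]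
    rw [if_pos ⟨hI, by decide⟩]
  have hB : combined_transposition_encrypt_alt plaintext "" = "" := by
    simp only [combined_transposition_encrypt_alt]
    rw [show (("".toList.length : Int)) = 0 by decide]
    rw [PySem.List.pyRange_one_eq_nil (le_refl 0)]
    rfl
  rw [hA, hB]
  decide
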